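-- pv_equiv track=rewrite | github.com/longytravel/simpleEA | scripts/generate_dashboard.py | _split_trades_by_forward_date
-- ===== SOURCE A (Python) =====
-- from typing import Any, Dict, List, Optional, Tuple
--
-- def _split_trades_by_forward_date(trades: List[Dict[str, Any]], forward_date: str) -> Tuple[List[Dict[str, Any]], List[Dict[str, Any]]]:
--     split_ts = f"{forward_date} 00:00:00"
--     in_sample: List[Dict[str, Any]] = []
--     forward: List[Dict[str, Any]] = []
--     for t in sorted(trades, key=lambda x: x.get("time", "")):
--         if (t.get("time", "") or "") < split_ts:
--             in_sample.append(t)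
--         else:
--             forward.append(t)
--     return in_sample, forward
-- ===== SOURCE B (Python) =====
-- from typing import Any, Dict, List, Tuple
--
-- def _split_trades_by_forward_date(trades: List[Dict[str, Any]], forward_date: str) -> Tuple[List[Dict[str, Any]], List[Dict[str, Any]]]:
--     # Sort once (same key as A); the sorted order makes the in-sample part a
--     # prefix, found by binary search on the boundary instead of a per-element scan.
--     split_ts = f"{forward_date} 00:00:00"
--     sorted_trades = sorted(trades, key=lambda x: x.get("time", ""))
--     keys = [(t.get("time", "") or "") for t in sorted_trades]
--     lo, hi = 0, len(keys)
--     while lo < hi: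
--         mid = (lo + hi) // 2
--         if keys[mid] < split_ts:
--             lo = mid + 1
--         else:
--             hi = mid
--     return sorted_trades[:lo], sorted_trades[lo:]
-- ===== Notes on version B (the rewrite author's own statement) =====
-- stated objective: alternative
-- what changed: Replaces A's per-element if/else partition loop over the sorted list with a binary search for the split boundary on the sorted keys followed by two slices.
import Mathlib
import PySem

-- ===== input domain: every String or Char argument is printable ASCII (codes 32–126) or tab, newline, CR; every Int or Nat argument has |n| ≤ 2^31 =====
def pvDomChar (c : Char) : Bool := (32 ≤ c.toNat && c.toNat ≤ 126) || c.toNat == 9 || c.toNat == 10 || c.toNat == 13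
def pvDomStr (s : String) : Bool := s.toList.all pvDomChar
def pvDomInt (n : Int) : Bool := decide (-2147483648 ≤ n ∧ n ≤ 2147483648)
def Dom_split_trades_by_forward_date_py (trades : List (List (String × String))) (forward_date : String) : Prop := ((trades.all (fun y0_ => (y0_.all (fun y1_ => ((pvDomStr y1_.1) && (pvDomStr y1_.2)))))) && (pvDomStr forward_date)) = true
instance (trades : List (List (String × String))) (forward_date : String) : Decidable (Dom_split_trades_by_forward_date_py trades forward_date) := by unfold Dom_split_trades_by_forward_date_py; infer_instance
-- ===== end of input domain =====

-- B finds the in-sample/forward boundary by binary search on the sorted keys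
-- instead of A's per-element if/else partition loop (objective: alternative).


-- ===== PORT A =====
-- t.get("time", "") for the assoc-list dict t
def pvTimeKey (t : List (String × String)) : String := PySem.Dict.getD ⟨t⟩ "time" ""

def split_trades_by_forward_date_py (trades : List (List (String × String))) (forward_date : String) : (List (List (String × String))) × (List (List (String × String))) :=
  let split_ts := forward_date ++ " 00:00:00"
  -- for t in sorted(trades, key=lambda x: x.get("time","")): append to in_sample / forward
  (PySem.List.sorted trades pvTimeKey).foldl
    (fun (acc : List (List (String × String)) × List (List (String × String))) t =>
      -- (t.get("time","") or "") : a string is falsy exactly when empty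
      let v := pvTimeKey t
      if (if v = "" then "" else v) < split_ts then (acc.1 ++ [t], acc.2)
      else (acc.1, acc.2 ++ [t]))
    ([], [])

-- ===== PORT B =====
-- the while-loop binary search of Source B (fuel = initial hi - lo bound; keys[mid] is
-- always in range when lo < hi ≤ keys.length, so getD is exact there)
def pvBsLoop (keys : List String) (x : String) : Nat → Nat → Nat → Nat
  | 0, lo, _ => lo
  | fuel+1, lo, hi =>
    if lo < hi then
      let mid := (lo + hi) / 2
      if keys.getD mid "" < x then pvBsLoop keys x fuel (mid+1) hi
      else pvBsLoop keys x fuel lo mid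
    else lo

def split_trades_by_forward_date_py_alt (trades : List (List (String × String))) (forward_date : String) : (List (List (String × String))) × (List (List (String × String))) :=
  let split_ts := forward_date ++ " 00:00:00"
  let sorted_trades := PySem.List.sorted trades pvTimeKey
  let keys := sorted_trades.map (fun t => let v := pvTimeKey t; if v = "" then "" else v)
  let lo := pvBsLoop keys split_ts keys.length 0 keys.length
  -- slices [:lo] and [lo:] with 0 ≤ lo ≤ len are exactly take/drop
  (sorted_trades.take lo, sorted_trades.drop lo)

-- ===== PRECONDITION & SPEC =====
def Spec_split_trades_by_forward_date_py (trades : List (List (String × String))) (forward_date : String) (out : (List (List (String × String))) × (List (List (String × String)))) : Prop := out = split_trades_by_forward_date_py_alt trades forward_date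
instance (trades : List (List (String × String))) (forward_date : String) (out : (List (List (String × String))) × (List (List (String × String)))) : Decidable (Spec_split_trades_by_forward_date_py trades forward_date out) := by unfold Spec_split_trades_by_forward_date_py; infer_instance

-- ===== CLAIM (what is proved, stated in full; the proofs are below) =====
def Claim_equal_split_trades_by_forward_date_py : Prop := ∀ (trades : List (List (String × String))) (forward_date : String), Dom_split_trades_by_forward_date_py trades forward_date → Spec_split_trades_by_forward_date_py trades forward_date (split_trades_by_forward_date_py trades forward_date)

-- ===== LEMMAS AND PROOFS =====

-- Python's (s or "") is the identity on strings
theorem pv_orEmpty (v : String) : (if v = "" then "" else v) = v := by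
  split <;> simp_all

-- A's loop is an append-partition
theorem pv_foldl_partition {α : Type} (p : α → Prop) [DecidablePred p]
    (xs : List α) (a b : List α) :
    xs.foldl (fun acc t => if p t then (acc.1 ++ [t], acc.2) else (acc.1, acc.2 ++ [t])) (a, b)
      = (a ++ xs.filter (fun t => decide (p t)), b ++ xs.filter (fun t => !decide (p t))) := by
  induction xs generalizing a b with
  | nil => simp
  | cons h tl ih =>
    by_cases hp : p h <;> simp [List.foldl_cons, hp, ih]

-- on a key-sorted list the "< ts" filter is the takeWhile prefix
theorem pv_filter_take {α : Type} (p : α → Bool) (s : List α)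
    (hmono : s.Pairwise (fun a b => p b = true → p a = true)) :
    s.filter p = s.takeWhile p ∧ s.filter (fun t => !p t) = s.dropWhile p := by
  induction s with
  | nil => simp
  | cons h tl ih =>
    rcases List.pairwise_cons.mp hmono with ⟨hh, htl⟩
    rcases ih htl with ⟨ih1, ih2⟩
    by_cases hb : p h = true
    · refine ⟨?_, ?_⟩
      · rw [List.filter_cons_of_pos hb, List.takeWhile_cons_of_pos hb, ih1]
      · rw [List.filter_cons_of_neg (by simp [hb]), List.dropWhile_cons_of_pos hb, ih2]
    · have hall : ∀ t ∈ tl, p t = false := fun t ht => by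
        cases hpt : p t
        · rfl
        · exact absurd (hh t ht hpt) hb
      refine ⟨?_, ?_⟩
      · rw [List.filter_cons_of_neg (by simpa using hb),
          List.takeWhile_cons_of_neg (by simpa using hb)]
        exact List.filter_eq_nil_iff.mpr (fun t ht => by simp [hall t ht])
      · rw [List.filter_cons_of_pos (by simpa using hb),
          List.dropWhile_cons_of_neg (by simpa using hb)]
        exact congrArg (h :: ·) (List.filter_eq_self.mpr (fun t ht => by simp [hall t ht]))

-- characterisation: on a sorted key list, K[j] < x iff j is inside the takeWhile prefix
theorem pv_key_char (K : List String) (x : String) (hK : K.Pairwise (· ≤ ·))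
    (j : Nat) (hj : j < K.length) :
    (K[j] < x ↔ j < (K.takeWhile (fun k => decide (k < x))).length) := by
  induction K generalizing j with
  | nil => simp at hj
  | cons k K' ih =>
    rcases List.pairwise_cons.mp hK with ⟨hh, hK'⟩
    by_cases hk : k < x
    · rw [List.takeWhile_cons_of_pos (by simpa using hk)]
      cases j with
      | zero => simpa using hk
      | succ j' =>
        have hj' : j' < K'.length := by simpa using hj
        simpa [Nat.succ_lt_succ_iff] using ih hK' j' hj'
    · rw [List.takeWhile_cons_of_neg (by simpa using hk)]
      simp only [List.length_nil, Nat.not_lt_zero, iff_false]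
      cases j with
      | zero => simpa using hk
      | succ j' =>
        have hj' : j' < K'.length := by simpa using hj
        have hle : k ≤ K'[j'] := hh _ (List.getElem_mem hj')
        simpa using fun hlt => hk (lt_of_le_of_lt hle hlt)

-- the binary search computes the takeWhile-prefix length
theorem pv_bsLoop_eq (K : List String) (x : String) (hK : K.Pairwise (· ≤ ·)) :
    ∀ (fuel lo hi : Nat), lo ≤ (K.takeWhile (fun k => decide (k < x))).length →
      (K.takeWhile (fun k => decide (k < x))).length ≤ hi → hi ≤ K.length →
      hi - lo ≤ fuel →
      pvBsLoop K x fuel lo hi = (K.takeWhile (fun k => decide (k < x))).length := by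
  intro fuel
  induction fuel with
  | zero =>
    intro lo hi h1 h2 h3 h4
    simp only [pvBsLoop]
    omega
  | succ fuel ih =>
    intro lo hi h1 h2 h3 h4
    simp only [pvBsLoop]
    by_cases hlh : lo < hi
    · rw [if_pos hlh]
      have hmid : (lo + hi) / 2 < K.length := by omega
      have hget : K.getD ((lo + hi) / 2) "" = K[(lo + hi) / 2] := List.getD_eq_getElem _ _ hmid
      rw [hget]
      by_cases hcmp : K[(lo + hi) / 2] < x
      · rw [if_pos hcmp]
        have := (pv_key_char K x hK _ hmid).mp hcmp
        exact ih ((lo + hi) / 2 + 1) hi (by omega) h2 h3 (by omega)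
      · rw [if_neg hcmp]
        have := (pv_key_char K x hK _ hmid).not.mp hcmp
        exact ih lo ((lo + hi) / 2) h1 (by omega) (by omega) (by omega)
    · rw [if_neg hlh]
      omega

-- take/drop at the takeWhile length give takeWhile/dropWhile
theorem pv_take_drop {α : Type} (p : α → Bool) (s : List α) :
    s.take (s.takeWhile p).length = s.takeWhile p ∧ s.drop (s.takeWhile p).length = s.dropWhile p := by
  induction s with
  | nil => simp
  | cons h tl ih =>
    cases hb : p h
    · rw [List.takeWhile_cons_of_neg (by simp [hb]), List.dropWhile_cons_of_neg (by simp [hb])]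
      simp
    · rw [List.takeWhile_cons_of_pos (by simp [hb]), List.dropWhile_cons_of_pos (by simp [hb])]
      simpa using ih

-- ===== VERDICT (by name: the statement is the Claim_ definition above) =====
theorem split_trades_by_forward_date_py_spec : Claim_equal_split_trades_by_forward_date_py := by
  intro trades fd _
  unfold Spec_split_trades_by_forward_date_py
  unfold split_trades_by_forward_date_py split_trades_by_forward_date_py_alt
  simp only [pv_orEmpty]
  set ts := fd ++ " 00:00:00" with hts
  set s := PySem.List.sorted trades pvTimeKey with hsdef
  set p : List (String × String) → Bool := fun t => decide (pvTimeKey t < ts) with hp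
  -- A's loop = ([] ++ filter, [] ++ filter-not)
  rw [pv_foldl_partition (fun t => pvTimeKey t < ts) s [] []]
  simp only [List.nil_append]
  -- sortedness facts
  have hpair : s.Pairwise (fun a b => pvTimeKey a ≤ pvTimeKey b) :=
    PySem.List.sorted_pairwise trades pvTimeKey
  have hKpair : (s.map pvTimeKey).Pairwise (· ≤ ·) :=
    PySem.List.sorted_map_key_pairwise trades pvTimeKey
  -- the binary search finds the takeWhile-prefix length
  have hT :
      pvBsLoop (s.map pvTimeKey) ts (s.map pvTimeKey).length 0 (s.map pvTimeKey).length
        = ((s.map pvTimeKey).takeWhile (fun k => decide (k < ts))).length := by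
    exact pv_bsLoop_eq (s.map pvTimeKey) ts hKpair _ 0 _
      (Nat.zero_le _)
      ((List.takeWhile_prefix _).length_le)
      (le_refl _)
      (by omega)
  have hTW : ((s.map pvTimeKey).takeWhile (fun k => decide (k < ts))).length
      = (s.takeWhile p).length := by
    rw [List.takeWhile_map, List.length_map]
    rfl
  rw [hT, hTW]
  -- filter = takeWhile / dropWhile on the sorted list
  have hmono : s.Pairwise (fun a b => p b = true → p a = true) := by
    refine hpair.imp ?_
    intro a b hab hpb
    simp only [hp, decide_eq_true_eq] at hpb ⊢
    exact lt_of_le_of_lt hab hpb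
  rcases pv_filter_take p s hmono with ⟨hf1, hf2⟩
  rw [hf1, hf2]
  -- take/drop at the takeWhile length are takeWhile/dropWhile
  rcases pv_take_drop p s with ⟨ht, hd⟩
  rw [ht, hd]
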